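-- pv_equiv track=rewrite | github.com/IKNOWINOT/Murphy-System | scripts/dependency_deprecation_agent.py | _insert_env_var
-- ===== SOURCE A (Python) =====
-- def _insert_env_var(content: str, key: str, value: str) -> str:
--     """Insert an environment variable into workflow YAML after the top-level env: block."""
--     lines = content.splitlines(keepends=True)
--     result: list[str] = []
--     inserted = False
--     in_top_env = False
--
--     for line in lines:
--         result.append(line)
--         stripped = line.rstrip()
--
--         # Detect top-level env: block (no leading whitespace)
--         if stripped == "env:" and not in_top_env and not inserted:
--             in_top_env = True
--             continue
--
--         # Insert after last entry in the top-level env: block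
--         if in_top_env and stripped and not stripped.startswith(" ") and not stripped.startswith("#"):
--             # We've left the env block — insert before this line
--             indent = "  "
--             env_line = f'{indent}{key}: "{value}"\n'
--             result.insert(len(result) - 1, env_line)
--             inserted = True
--             in_top_env = False
--
--     # If env block was the last thing in the file, append
--     if in_top_env and not inserted:
--         result.append(f'  {key}: "{value}"\n')
--
--     return "".join(result)
-- ===== SOURCE B (Python) =====
-- def _insert_env_var(content: str, key: str, value: str) -> str:
--     """Locate-then-splice: find the top-level env: line, then the line ending its block."""
--     lines = content.splitlines(keepends=True)
--     env_idx = next((i for i, ln in enumerate(lines) if ln.rstrip() == "env:"), None)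
--     if env_idx is None:
--         return content
--     new_line = f'  {key}: "{value}"\n'
--     for j in range(env_idx + 1, len(lines)):
--         s = lines[j].rstrip()
--         if s and not s.startswith(" ") and not s.startswith("#"):
--             return "".join(lines[:j] + [new_line] + lines[j:])
--     return "".join(lines) + new_line
-- ===== Notes on version B (the rewrite author's own statement) =====
-- stated objective: simpler
-- what changed: Replaces A's single pass threading (result, inserted, in_top_env) flags through every line with a locate-then-splice decomposition: find the index of the top-level 'env:' line, then the index of the first block-ending line after it, and splice the new env line in by list slicing (or append it / return content unchanged).
import Mathlib
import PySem

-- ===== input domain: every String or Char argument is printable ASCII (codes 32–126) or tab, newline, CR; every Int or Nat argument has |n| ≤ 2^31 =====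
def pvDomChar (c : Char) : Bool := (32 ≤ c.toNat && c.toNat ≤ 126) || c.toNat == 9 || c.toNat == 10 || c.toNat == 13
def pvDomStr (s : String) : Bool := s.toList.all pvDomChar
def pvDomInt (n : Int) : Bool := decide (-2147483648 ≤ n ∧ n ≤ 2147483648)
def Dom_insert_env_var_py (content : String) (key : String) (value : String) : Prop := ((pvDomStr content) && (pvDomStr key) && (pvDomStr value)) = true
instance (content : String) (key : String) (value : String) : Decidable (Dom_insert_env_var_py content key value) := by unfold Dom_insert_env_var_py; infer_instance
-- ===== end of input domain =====

-- B replaces A's single-pass flag-threaded insert with a locate-then-splice decomposition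
-- (find the env: line, then the block-ending line, then splice by slicing); objective: simpler.


-- shared helper: content.splitlines(keepends=True); exact on the ASCII+tab/NL/CR domain,
-- where Python's line boundaries are '\n', '\r' and '\r\n'.
def pvSplitKeep (acc : List Char) : List Char → List (List Char)
  | [] => if acc = [] then [] else [acc.reverse]
  | '\r' :: '\n' :: rest => (acc.reverse ++ ['\r', '\n']) :: pvSplitKeep [] rest
  | '\r' :: rest => (acc.reverse ++ ['\r']) :: pvSplitKeep [] rest
  | '\n' :: rest => (acc.reverse ++ ['\n']) :: pvSplitKeep [] rest
  | c :: rest => pvSplitKeep (c :: acc) rest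

-- f'  {key}: "{value}"\n'
def pvEnvLine (key value : String) : List Char :=
  [' ', ' '] ++ key.toList ++ [':', ' ', '"'] ++ value.toList ++ ['"', '\n']

-- ===== PORT A =====
-- A's loop, threading its state (result, inserted, in_top_env) line by line
def pvALoop (env : List Char) : List (List Char) × Bool × Bool → List (List Char) → List (List Char) × Bool × Bool
  | st, [] => st
  | (result0, inserted, inTop), line :: rest =>
    let result := result0 ++ [line]
    let stripped := PySem.Chars.rstrip line
    if stripped == "env:".toList && !inTop && !inserted then
      pvALoop env (result, inserted, true) rest
    else if inTop && !stripped.isEmpty && !PySem.Chars.startswith stripped [' ']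
            && !PySem.Chars.startswith stripped ['#'] then
      pvALoop env (PySem.List.insert result ((result.length : Int) - 1) env, true, false) rest
    else
      pvALoop env (result, inserted, inTop) rest

def insert_env_var_py (content : String) (key : String) (value : String) : String :=
  let lines := pvSplitKeep [] content.toList
  let st := pvALoop (pvEnvLine key value) ([], false, false) lines
  let result := if st.2.2 && !st.2.1 then st.1 ++ [pvEnvLine key value] else st.1
  String.ofList (PySem.Chars.join [] result)

-- ===== PORT B =====
def pvIsEnv (ln : List Char) : Bool := PySem.Chars.rstrip ln == "env:".toList

def pvIsTerm (ln : List Char) : Bool :=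
  !(PySem.Chars.rstrip ln).isEmpty && !PySem.Chars.startswith (PySem.Chars.rstrip ln) [' ']
    && !PySem.Chars.startswith (PySem.Chars.rstrip ln) ['#']

def insert_env_var_py_alt (content : String) (key : String) (value : String) : String :=
  let lines := pvSplitKeep [] content.toList
  match List.findIdx? pvIsEnv lines with
  | none => content
  | some i =>
    let newLine := pvEnvLine key value
    match List.findIdx? pvIsTerm (lines.drop (i + 1)) with
    | some k =>
      String.ofList (PySem.Chars.join []
        (lines.take (i + 1 + k) ++ [newLine] ++ lines.drop (i + 1 + k)))
    | none => String.ofList (PySem.Chars.join [] lines ++ newLine)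

-- ===== PRECONDITION & SPEC =====
def Spec_insert_env_var_py (content : String) (key : String) (value : String) (out : String) : Prop := out = insert_env_var_py_alt content key value
instance (content : String) (key : String) (value : String) (out : String) : Decidable (Spec_insert_env_var_py content key value out) := by unfold Spec_insert_env_var_py; infer_instance

-- ===== CLAIM (what is proved, stated in full; the proofs are below) =====
def Claim_equal_insert_env_var_py : Prop := ∀ (content : String) (key : String) (value : String), Dom_insert_env_var_py content key value → Spec_insert_env_var_py content key value (insert_env_var_py content key value)

-- ===== LEMMAS AND PROOFS =====

theorem pvJoin_nil_eq_flatten (l : List (List Char)) : PySem.Chars.join [] l = l.flatten := by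
  induction l with
  | nil => simp [PySem.Chars.join_nil]
  | cons x xs ih =>
    cases xs with
    | nil => simp [PySem.Chars.join_singleton]
    | cons y ys =>
      rw [PySem.Chars.join_cons_cons]
      simp [ih]

theorem pvSplitKeep_flatten (acc : List Char) (cs : List Char) :
    (pvSplitKeep acc cs).flatten = acc.reverse ++ cs := by
  fun_induction pvSplitKeep acc cs <;> simp_all

theorem pvInsert_pre_last (r : List (List Char)) (l e : List Char) :
    PySem.List.insert (r ++ [l]) (((r ++ [l]).length : Int) - 1) e = r ++ [e, l] := by
  have h : ((r ++ [l]).length : Int) - 1 = (r.length : Int) := by simp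
  rw [h]
  simp [PySem.List.insert, PySem.List.sliceIndices]
  rw [if_neg (by omega)]
  simp

-- in state (inserted = true, inTop = false) the loop only appends
theorem pvALoop_done (env : List Char) (acc : List (List Char)) (rest : List (List Char)) :
    pvALoop env (acc, true, false) rest = (acc ++ rest, true, false) := by
  induction rest generalizing acc with
  | nil => simp [pvALoop]
  | cons l ls ih => simp [pvALoop, ih]

-- in state (inserted = false, inTop = true) the loop scans for the first block-ending line
theorem pvALoop_inTop (env : List Char) (acc : List (List Char)) (rest : List (List Char)) :
    pvALoop env (acc, false, true) rest =
      match List.findIdx? pvIsTerm rest with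
      | some j => (acc ++ rest.take j ++ [env] ++ rest.drop j, true, false)
      | none => (acc ++ rest, false, true) := by
  induction rest generalizing acc with
  | nil => simp [pvALoop]
  | cons l ls ih =>
    have hfold : (!(PySem.Chars.rstrip l).isEmpty
        && !PySem.Chars.startswith (PySem.Chars.rstrip l) [' ']
        && !PySem.Chars.startswith (PySem.Chars.rstrip l) ['#']) = pvIsTerm l := rfl
    by_cases ht : pvIsTerm l
    · simp only [pvALoop, Bool.not_true, Bool.and_false, Bool.false_and,
        Bool.true_and, hfold, ht, if_true, List.findIdx?_cons]
      rw [pvInsert_pre_last, pvALoop_done]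
      simp
    · simp only [pvALoop, Bool.not_true, Bool.and_false, Bool.false_and,
        Bool.true_and, hfold, Bool.not_eq_true] at *
      simp only [ht, if_false, List.findIdx?_cons, Bool.false_eq_true]
      rw [ih]
      cases h : List.findIdx? pvIsTerm ls <;> simp [List.append_assoc]

-- in the initial state the loop scans for the first env: line
theorem pvALoop_start (env : List Char) (acc : List (List Char)) (rest : List (List Char)) :
    pvALoop env (acc, false, false) rest =
      match List.findIdx? pvIsEnv rest with
      | none => (acc ++ rest, false, false)
      | some i => pvALoop env (acc ++ rest.take (i + 1), false, true) (rest.drop (i + 1)) := by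
  induction rest generalizing acc with
  | nil => simp [pvALoop]
  | cons l ls ih =>
    have hfold : (PySem.Chars.rstrip l == "env:".toList) = pvIsEnv l := rfl
    by_cases he : pvIsEnv l
    · simp only [pvALoop, Bool.not_false, Bool.and_true, hfold, he, if_true,
        List.findIdx?_cons]
      simp
    · simp only [pvALoop, Bool.not_false, Bool.and_true, hfold, Bool.not_eq_true] at *
      simp only [he, List.findIdx?_cons, Bool.false_eq_true, ite_false]
      rw [ih]
      cases h : List.findIdx? pvIsEnv ls <;> simp [List.append_assoc]

-- ===== VERDICT (by name: the statement is the Claim_ definition above) =====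
theorem insert_env_var_py_spec : Claim_equal_insert_env_var_py := by
  intro content key value _
  unfold Spec_insert_env_var_py insert_env_var_py insert_env_var_py_alt
  simp only [pvALoop_start]
  cases he : List.findIdx? pvIsEnv (pvSplitKeep [] content.toList) with
  | none =>
    simp [pvJoin_nil_eq_flatten, pvSplitKeep_flatten]
  | some i =>
    simp only [pvALoop_inTop]
    cases ht : List.findIdx? pvIsTerm ((pvSplitKeep [] content.toList).drop (i + 1)) with
    | none =>
      simp [pvJoin_nil_eq_flatten, List.flatten_append]
    | some k =>
      have hL : List.take (i + (k + 1)) (pvSplitKeep [] content.toList)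
          = List.take (i + 1) (pvSplitKeep [] content.toList)
            ++ List.take k (List.drop (i + 1) (pvSplitKeep [] content.toList)) := by
        rw [show i + (k + 1) = i + 1 + k by omega, List.take_add]
      simp [pvJoin_nil_eq_flatten, hL, List.flatten_append, List.append_assoc,
        Nat.add_comm, Nat.add_left_comm]
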